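-- pv_equiv track=rewrite | github.com/leolavaur/radar-srds-2024 | exps/trustfids/utils/distribution.py | build_merged_distribution_baseline
-- ===== SOURCE A (Python) =====
-- from typing import List
--
-- def build_merged_distribution_baseline(distribution: List[int]) -> List[List[str]]:
--     """return the expected cluster distribution with IoT dataset merged from distribution scalars.
--     Args:
--         distribution: List of scalar reprensenting the distribution of clients.
--     Return:
--         List of List of client_id representing the expected cluster distribution with IoT datasets merged
--     """
--     client_id = 0
--     result = []
--     for silo_size in distribution:
--         l = []
--         for c in range(silo_size):
--             l.append(f"client_{client_id}")
--             client_id += 1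
--         result.append(l)
--     # IoT datasets are currently in first and last place
--     result[0] += result[-1]
--     return result[:-1]
-- ===== SOURCE B (Python) =====
-- from typing import List
--
-- def build_merged_distribution_baseline(distribution: List[int]) -> List[List[str]]:
--     """Two-pass re-implementation: generate the flat id list once, then
--     partition it by slicing at running offsets (same merge of last group into first)."""
--     sizes = [max(s, 0) for s in distribution]
--     total = sum(sizes)
--     ids = [f"client_{i}" for i in range(total)]
--     result = []
--     offset = 0
--     for silo_size in sizes:
--         result.append(ids[offset:offset + silo_size])
--         offset += silo_size
--     result[0] = result[0] + result[-1]
--     return result[:-1]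
-- ===== Notes on version B (the rewrite author's own statement) =====
-- stated objective: alternative
-- what changed: B separates id generation from grouping: it builds the flat client-id list in one pass and then partitions it by slicing at running offsets, instead of A's interleaved per-silo counter loop with nested append.
import Mathlib
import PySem

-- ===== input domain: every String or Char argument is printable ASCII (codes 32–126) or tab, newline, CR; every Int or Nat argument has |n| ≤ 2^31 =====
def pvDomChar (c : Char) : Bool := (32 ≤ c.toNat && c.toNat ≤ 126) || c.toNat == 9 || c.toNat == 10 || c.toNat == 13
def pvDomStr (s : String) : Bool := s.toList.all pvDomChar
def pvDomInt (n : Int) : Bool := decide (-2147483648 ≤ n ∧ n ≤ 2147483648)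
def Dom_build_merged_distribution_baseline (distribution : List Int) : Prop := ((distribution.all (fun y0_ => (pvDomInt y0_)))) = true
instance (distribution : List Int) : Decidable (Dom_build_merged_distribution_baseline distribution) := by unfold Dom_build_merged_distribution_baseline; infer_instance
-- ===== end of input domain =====

-- B builds the flat client-id list once, then partitions it by slicing at running
-- offsets, instead of A's interleaved counter loop (alternative decomposition; same cost).

-- ===== PORT A =====
def build_merged_distribution_baseline (distribution : List Int) : List (List String) :=
  let st := distribution.foldl
    (fun (st : Int × List (List String)) silo_size =>
      let inner := (PySem.List.pyRange 0 silo_size 1).foldl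
        (fun (p : Int × List String) _ =>
          (p.1 + 1, p.2 ++ ["client_" ++ PySem.Int.toStr p.1]))
        (st.1, [])
      (inner.1, st.2 ++ [inner.2]))
    (0, [])
  match st.2 with
  | [] => []   -- Python raises IndexError here (excluded by Pre_)
  | r0 :: rest =>
    -- merge the last group into the first, then drop the last group
    ((r0 ++ (r0 :: rest).getLast (by simp)) :: rest).dropLast

-- ===== PORT B =====
def build_merged_distribution_baseline_alt (distribution : List Int) : List (List String) :=
  let sizes := distribution.map (fun s => max s 0)
  let total := sizes.sum
  let ids := (PySem.List.pyRange 0 total 1).map (fun i => "client_" ++ PySem.Int.toStr i)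
  let grouped := (sizes.foldl
    (fun (st : Int × List (List String)) silo_size =>
      (st.1 + silo_size, st.2 ++ [PySem.List.slice ids (some st.1) (some (st.1 + silo_size))]))
    (0, [])).2
  match grouped with
  | [] => []   -- Python raises IndexError here (excluded by Pre_)
  | r0 :: rest =>
    -- merge the last group into the first, then drop the last group
    ((r0 ++ (r0 :: rest).getLast (by simp)) :: rest).dropLast

-- ===== PRECONDITION & SPEC =====
-- Pre_ excludes only the empty list, on which Python A (and B) raise IndexError when merging into the first group.
def Pre_build_merged_distribution_baseline (distribution : List Int) : Prop := distribution ≠ []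
instance (distribution : List Int) : Decidable (Pre_build_merged_distribution_baseline distribution) := by unfold Pre_build_merged_distribution_baseline; infer_instance
def pvWitness_build_merged_distribution_baseline : List Int := [2, 1, 2]

def Spec_build_merged_distribution_baseline (distribution : List Int) (out : List (List String)) : Prop := out = build_merged_distribution_baseline_alt distribution
instance (distribution : List Int) (out : List (List String)) : Decidable (Spec_build_merged_distribution_baseline distribution out) := by unfold Spec_build_merged_distribution_baseline; infer_instance

-- ===== CLAIM (what is proved, stated in full; the proofs are below) =====
def Claim_equal_build_merged_distribution_baseline : Prop := ∀ (distribution : List Int), Dom_build_merged_distribution_baseline distribution → Pre_build_merged_distribution_baseline distribution → Spec_build_merged_distribution_baseline distribution (build_merged_distribution_baseline distribution)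

-- ===== LEMMAS AND PROOFS =====

/-- The group of ids produced for one silo starting at id `cid`. -/
def pvChunk (cid : Int) (n : Nat) : List String :=
  (List.range n).map (fun (k : Nat) => "client_" ++ PySem.Int.toStr (cid + (k : Int)))

/-- Reference grouping: the list of per-silo id groups. -/
def pvGroups (cid : Int) : List Int → List (List String)
  | [] => []
  | s :: rest => pvChunk cid s.toNat :: pvGroups (cid + s.toNat) rest

def pvSum (d : List Int) : Nat := (d.map Int.toNat).sum

lemma pvF_congr (i j : Int) (h : i = j) :
    "client_" ++ PySem.Int.toStr i = "client_" ++ PySem.Int.toStr j := by rw [h]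

lemma pvChunk_succ (cid : Int) (n : Nat) :
    pvChunk cid (n + 1) = ("client_" ++ PySem.Int.toStr cid) :: pvChunk (cid + 1) n := by
  unfold pvChunk
  rw [List.range_succ_eq_map]
  simp only [List.map_cons, List.map_map]
  congr 1
  · exact pvF_congr _ _ (by push_cast; ring)
  · refine List.map_congr_left ?_
    intro k _
    simp only [Function.comp]
    exact pvF_congr _ _ (by push_cast; ring)

lemma innerA (xs : List Int) : ∀ (cid : Int) (acc : List String),
    xs.foldl (fun (p : Int × List String) _ =>
      (p.1 + 1, p.2 ++ ["client_" ++ PySem.Int.toStr p.1])) (cid, acc)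
    = (cid + xs.length, acc ++ pvChunk cid xs.length) := by
  induction xs with
  | nil => intro cid acc; simp [pvChunk]
  | cons x xs ih =>
    intro cid acc
    simp only [List.foldl_cons, List.length_cons, ih]
    rw [pvChunk_succ]
    simp only [Prod.mk.injEq]
    constructor
    · omega
    · simp

lemma outerA : ∀ (d : List Int) (cid : Int) (acc : List (List String)),
    d.foldl
      (fun (st : Int × List (List String)) silo_size =>
        let inner := (PySem.List.pyRange 0 silo_size 1).foldl
          (fun (p : Int × List String) _ =>
            (p.1 + 1, p.2 ++ ["client_" ++ PySem.Int.toStr p.1]))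
          (st.1, [])
        (inner.1, st.2 ++ [inner.2]))
      (cid, acc)
    = (cid + (pvSum d : Int), acc ++ pvGroups cid d) := by
  intro d
  induction d with
  | nil => intro cid acc; simp [pvSum, pvGroups]
  | cons s rest ih =>
    intro cid acc
    simp only [List.foldl_cons]
    rw [innerA]
    simp only [PySem.List.length_pyRange_one, Int.sub_zero]
    rw [ih]
    simp only [Prod.mk.injEq]
    constructor
    · simp only [pvSum, List.map_cons, List.sum_cons]; push_cast; omega
    · simp [pvGroups]

lemma chunk_take_drop (g : Int → String) (N : Nat) (m n : Nat) (h : m + n ≤ N) :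
    ((((List.range N).map (fun (k : Nat) => g (k : Int))).drop m).take n)
    = (List.range n).map (fun (k : Nat) => g ((m : Int) + (k : Int))) := by
  apply List.ext_getElem
  · simp only [List.length_take, List.length_drop, List.length_map, List.length_range]
    omega
  · intro i h1 h2
    simp only [List.getElem_take, List.getElem_drop, List.getElem_map, List.getElem_range]
    push_cast
    rfl

lemma sizes_sum (d : List Int) : (d.map (fun s => max s 0)).sum = (pvSum d : Int) := by
  induction d with
  | nil => simp [pvSum]
  | cons s rest ih =>
    simp only [List.map_cons, List.sum_cons, ih, pvSum, List.map_cons, List.sum_cons]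
    push_cast
    omega

lemma ids_eq (total : Nat) :
    ((PySem.List.pyRange 0 (total : Int) 1).map (fun i => "client_" ++ PySem.Int.toStr i))
    = (List.range total).map (fun (k : Nat) => "client_" ++ PySem.Int.toStr (k : Int)) := by
  rw [PySem.List.pyRange_one]
  rw [List.map_map]
  have h : ((total : Int) - 0).toNat = total := by omega
  rw [h]
  refine List.map_congr_left ?_
  intro k _
  simp only [Function.comp]
  exact pvF_congr _ _ (by omega)

lemma outerB (total : Nat) :
    ∀ (d : List Int) (off : Int) (acc : List (List String)),
    0 ≤ off → off + (pvSum d : Int) ≤ (total : Int) →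
    ((d.map (fun s => max s 0)).foldl
      (fun (st : Int × List (List String)) silo_size =>
        (st.1 + silo_size,
         st.2 ++ [PySem.List.slice
           ((List.range total).map (fun (k : Nat) => "client_" ++ PySem.Int.toStr (k : Int)))
           (some st.1) (some (st.1 + silo_size))]))
      (off, acc)).2
    = acc ++ pvGroups off d := by
  intro d
  induction d with
  | nil => intro off acc _ _; simp [pvGroups]
  | cons s rest ih =>
    intro off acc hoff htot
    have hsum : (pvSum (s :: rest) : Int) = (s.toNat : Int) + (pvSum rest : Int) := by
      simp only [pvSum, List.map_cons, List.sum_cons]; omega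
    have hs0 : (0 : Int) ≤ max s 0 := le_max_right _ _
    have hslice : PySem.List.slice
        ((List.range total).map (fun (k : Nat) => "client_" ++ PySem.Int.toStr (k : Int)))
        (some off) (some (off + max s 0)) = pvChunk off s.toNat := by
      rw [PySem.List.slice_toNat _ hoff (by omega)]
      have h1 : (off + max s 0).toNat - off.toNat = s.toNat := by omega
      rw [h1]
      have h2 : off.toNat + s.toNat ≤ total := by omega
      rw [chunk_take_drop (fun i => "client_" ++ PySem.Int.toStr i) total off.toNat s.toNat h2]
      unfold pvChunk
      refine List.map_congr_left ?_
      intro k _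
      exact pvF_congr _ _ (by omega)
    simp only [List.map_cons, List.foldl_cons, hslice]
    rw [ih (off + max s 0) (acc ++ [pvChunk off s.toNat]) (by omega) (by omega)]
    have hoffmax : off + max s 0 = off + (s.toNat : Int) := by omega
    rw [hoffmax]
    simp [pvGroups]

lemma grouped_eq (d : List Int) :
    build_merged_distribution_baseline d = build_merged_distribution_baseline_alt d := by
  unfold build_merged_distribution_baseline build_merged_distribution_baseline_alt
  simp only [outerA, sizes_sum, ids_eq]
  rw [outerB (pvSum d) d 0 [] le_rfl (by omega)]

-- ===== VERDICT (by name: the statement is the Claim_ definition above) =====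
theorem build_merged_distribution_baseline_spec : Claim_equal_build_merged_distribution_baseline := by
  intro d _ _
  unfold Spec_build_merged_distribution_baseline
  exact grouped_eq d
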